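-- pv_equiv track=rewrite | github.com/pj323/DSALeetcode | Basics/basic_pattern.py | max_consecutive_difference
-- ===== SOURCE A (Python) =====
-- def max_consecutive_difference(lst):
--
--     max_diff = 0
--
--
--
--     for i in range(len(lst)):
--         for j in range(i + 1, len(lst)):
--             diff = abs(lst[i] - lst[j])
--             if diff > max_diff:
--
--                 max_diff = diff
--
--     return max_diff
-- ===== SOURCE B (Python) =====
-- def max_consecutive_difference(lst):
--     s = sorted(lst)
--     return s[-1] - s[0] if s else 0
-- ===== Notes on version B (the rewrite author's own statement) =====
-- stated objective: faster
-- what changed: Replaced the nested all-pairs |lst[i]-lst[j]| scan by sorting a copy of the list and returning last-minus-first (the max absolute pairwise difference is the range).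
import Mathlib
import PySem

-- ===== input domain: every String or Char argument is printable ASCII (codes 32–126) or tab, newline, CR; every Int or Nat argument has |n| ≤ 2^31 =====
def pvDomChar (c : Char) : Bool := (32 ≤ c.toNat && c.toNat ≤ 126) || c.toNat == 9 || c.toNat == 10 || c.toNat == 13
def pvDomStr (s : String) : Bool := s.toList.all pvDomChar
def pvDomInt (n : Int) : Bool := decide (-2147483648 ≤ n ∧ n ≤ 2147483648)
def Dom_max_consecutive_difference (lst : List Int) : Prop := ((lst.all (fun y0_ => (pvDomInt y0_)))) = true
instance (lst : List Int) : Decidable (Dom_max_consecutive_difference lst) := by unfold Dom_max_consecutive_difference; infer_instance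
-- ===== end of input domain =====

-- B sorts a copy of the list and returns last-minus-first instead of A's nested all-pairs scan (faster).


-- ===== PORT A =====
def max_consecutive_difference (lst : List Int) : Int :=
  (PySem.List.pyRange 0 (PySem.List.len lst) 1).foldl
    (fun md i =>
      (PySem.List.pyRange (i + 1) (PySem.List.len lst) 1).foldl
        (fun md j =>
          let diff := |PySem.List.pyGetD lst i 0 - PySem.List.pyGetD lst j 0|
          if diff > md then diff else md) md) 0

-- ===== PORT B =====
def max_consecutive_difference_alt (lst : List Int) : Int :=
  let s := PySem.List.sorted lst (fun x => x) false
  if s = [] then 0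
  else (PySem.List.pyGet? s (-1)).getD 0 - (PySem.List.pyGet? s 0).getD 0

-- ===== PRECONDITION & SPEC =====
def Spec_max_consecutive_difference (lst : List Int) (out : Int) : Prop := out = max_consecutive_difference_alt lst
instance (lst : List Int) (out : Int) : Decidable (Spec_max_consecutive_difference lst out) := by unfold Spec_max_consecutive_difference; infer_instance

-- ===== CLAIM (what is proved, stated in full; the proofs are below) =====
def Claim_equal_max_consecutive_difference : Prop := ∀ (lst : List Int), Dom_max_consecutive_difference lst → Spec_max_consecutive_difference lst (max_consecutive_difference lst)

-- ===== LEMMAS AND PROOFS =====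

-- element-wise restatement of A's nested index loops
def pairMax : List Int → Int → Int
  | [], md => md
  | x :: t, md => pairMax t (t.foldl (fun md y => if |x - y| > md then |x - y| else md) md)

-- A's inner loop, named so the rewrites below stay readable
def innerLoop (lst : List Int) (i md : Int) : Int :=
  (PySem.List.pyRange (i + 1) ((lst.length : Int)) 1).foldl
    (fun md j =>
      let diff := |PySem.List.pyGetD lst i 0 - PySem.List.pyGetD lst j 0|
      if diff > md then diff else md) md

-- A's inner loop as a fold over the elements after position i
def G (lst : List Int) (acc : Int) (k : Nat) : Int :=
  (lst.drop (k + 1)).foldl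
    (fun md y => if |lst.getD k 0 - y| > md then |lst.getD k 0 - y| else md) acc

theorem inner_eq (lst : List Int) (i : Nat) (acc : Int) : innerLoop lst (i : Int) acc = G lst acc i := by
  have h : (PySem.List.pyRange ((i : Int) + 1) ((lst.length : Int)) 1).foldl
      (fun md j => if |lst.getD i 0 - PySem.List.pyGetD lst j 0| > md
        then |lst.getD i 0 - PySem.List.pyGetD lst j 0| else md) acc
      = (lst.drop (((i : Int) + 1).toNat)).foldl
        (fun md y => if |lst.getD i 0 - y| > md then |lst.getD i 0 - y| else md) acc :=
    PySem.List.foldl_pyRange_pyGetD' lst 0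
      (fun md y => if |lst.getD i 0 - y| > md then |lst.getD i 0 - y| else md) acc (by omega)
  have ht : ((i : Int) + 1).toNat = i + 1 := by omega
  rw [ht] at h
  unfold G
  rw [← h]
  unfold innerLoop
  apply List.foldl_ext
  intro a b _
  simp

theorem G_eq_pairMax (lst : List Int) (md : Int) :
    (List.range lst.length).foldl (fun acc k => G lst acc k) md = pairMax lst md := by
  induction lst generalizing md with
  | nil => simp [pairMax]
  | cons x t ih =>
      rw [List.length_cons, List.range_succ_eq_map, List.foldl_cons, List.foldl_map]
      have h0 : G (x :: t) md 0 = t.foldl (fun md y => if |x - y| > md then |x - y| else md) md := by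
        simp [G]
      rw [h0]
      have hstep : ∀ (acc : Int), ∀ k ∈ List.range t.length, G (x :: t) acc (k + 1) = G t acc k := by
        intro acc k _
        simp [G]
      simp only [pairMax]
      exact (List.foldl_ext _ _ _ hstep).trans (ih _)

theorem A_eq_pairMax (lst : List Int) : max_consecutive_difference lst = pairMax lst 0 := by
  have h1 : max_consecutive_difference lst
      = (PySem.List.pyRange 0 ((lst.length : Int)) 1).foldl (fun md i => innerLoop lst i md) 0 := by
    simp only [max_consecutive_difference, innerLoop, PySem.List.len_eq]
  rw [h1, PySem.List.pyRange_one]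
  simp only [sub_zero, Int.toNat_natCast]
  rw [List.foldl_map]
  have hstep : ∀ (acc : Int), ∀ k ∈ List.range lst.length,
      innerLoop lst (0 + (k : Int)) acc = G lst acc k := by
    intro acc k _
    rw [zero_add, inner_eq]
  exact (List.foldl_ext _ _ _ hstep).trans (G_eq_pairMax lst 0)

theorem foldl_absmax_init_le (f : Int → Int) (t : List Int) (init : Int) :
    init ≤ t.foldl (fun a y => if f y > a then f y else a) init := by
  induction t generalizing init with
  | nil => simp
  | cons a t ih =>
      simp only [List.foldl_cons]
      refine le_trans ?_ (ih _)
      split <;> omega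

theorem foldl_absmax_ge_elem (f : Int → Int) (t : List Int) (init : Int) :
    ∀ y ∈ t, f y ≤ t.foldl (fun a y => if f y > a then f y else a) init := by
  induction t generalizing init with
  | nil => simp
  | cons a t ih =>
      intro y hy
      simp only [List.foldl_cons]
      rcases List.mem_cons.mp hy with rfl | hy
      · refine le_trans ?_ (foldl_absmax_init_le f t _)
        split <;> omega
      · exact ih _ y hy

theorem foldl_absmax_le (f : Int → Int) (t : List Int) (init B : Int)
    (h : init ≤ B) (hf : ∀ y ∈ t, f y ≤ B) :
    t.foldl (fun a y => if f y > a then f y else a) init ≤ B := by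
  induction t generalizing init with
  | nil => exact h
  | cons a t ih =>
      simp only [List.foldl_cons]
      apply ih
      · split
        · exact hf a (by simp)
        · exact h
      · exact fun y hy => hf y (by simp [hy])

theorem pairMax_init_le (lst : List Int) (md : Int) : md ≤ pairMax lst md := by
  induction lst generalizing md with
  | nil => simp [pairMax]
  | cons x t ih =>
      simp only [pairMax]
      exact le_trans (foldl_absmax_init_le (fun y => |x - y|) t md) (ih _)

theorem pairMax_ge (lst : List Int) (md : Int) (h0 : 0 ≤ md) :
    ∀ x ∈ lst, ∀ y ∈ lst, |x - y| ≤ pairMax lst md := by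
  induction lst generalizing md with
  | nil => simp
  | cons a t ih =>
      intro x hx y hy
      simp only [pairMax]
      have hle : md ≤ t.foldl (fun md y => if |a - y| > md then |a - y| else md) md :=
        foldl_absmax_init_le (fun y => |a - y|) t md
      have hmp : t.foldl (fun md y => if |a - y| > md then |a - y| else md) md
          ≤ pairMax t (t.foldl (fun md y => if |a - y| > md then |a - y| else md) md) :=
        pairMax_init_le t _
      rcases List.mem_cons.mp hx with hxa | hxt
      · subst hxa
        rcases List.mem_cons.mp hy with hya | hyt
        · subst hya
          simpa using le_trans (le_trans h0 hle) hmp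
        · exact le_trans (foldl_absmax_ge_elem _ t md y hyt) hmp
      · rcases List.mem_cons.mp hy with hya | hyt
        · subst hya
          rw [abs_sub_comm]
          exact le_trans (foldl_absmax_ge_elem _ t md x hxt) hmp
        · exact ih _ (le_trans h0 hle) x hxt y hyt

theorem pairMax_le (lst : List Int) (md B : Int) (h : md ≤ B)
    (hB : ∀ x ∈ lst, ∀ y ∈ lst, |x - y| ≤ B) : pairMax lst md ≤ B := by
  induction lst generalizing md with
  | nil => exact h
  | cons a t ih =>
      simp only [pairMax]
      apply ih
      · exact foldl_absmax_le (fun y => |a - y|) t md B h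
          (fun y hy => hB a (by simp) y (by simp [hy]))
      · exact fun x hx y hy => hB x (by simp [hx]) y (by simp [hy])

theorem pairwise_le_getLast (l : List Int) (hp : l.Pairwise (· ≤ ·)) (h : l ≠ []) :
    ∀ y ∈ l, y ≤ l.getLast h := by
  induction l with
  | nil => simp
  | cons a t ih =>
      intro y hy
      cases t with
      | nil =>
          simp only [List.mem_singleton] at hy
          simp [hy]
      | cons b t' =>
          rw [List.getLast_cons (by simp)]
          rcases List.mem_cons.mp hy with rfl | hy
          · exact (List.pairwise_cons.mp hp).1 _ (List.getLast_mem _)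
          · exact ih (List.pairwise_cons.mp hp).2 (by simp) y hy

-- ===== VERDICT (by name: the statement is the Claim_ definition above) =====
theorem max_consecutive_difference_spec : Claim_equal_max_consecutive_difference := by
  intro lst _
  unfold Spec_max_consecutive_difference
  rw [A_eq_pairMax]
  cases lst with
  | nil => decide
  | cons x t =>
      simp only [max_consecutive_difference_alt]
      set s := PySem.List.sorted (x :: t) (fun x => x) false with hsdef
      have hperm : s.Perm (x :: t) := by
        rw [hsdef]; apply PySem.List.sorted_perm
      have hs : s ≠ [] := by
        intro h0
        have hl := hperm.length_eq
        rw [h0] at hl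
        simp at hl
      have hpw : s.Pairwise (· ≤ ·) := by
        rw [hsdef]; apply PySem.List.sorted_pairwise
      have hmem : ∀ z : Int, z ∈ s ↔ z ∈ x :: t := fun z => hperm.mem_iff
      obtain ⟨m, s', hms⟩ : ∃ m s', s = m :: s' := by
        cases hcs : s with
        | nil => exact absurd hcs hs
        | cons m s' => exact ⟨m, s', rfl⟩
      have h0v : s[0]? = some m := by rw [hms]; rfl
      rw [if_neg hs, PySem.List.pyGet?_neg_one, PySem.List.pyGet?_zero,
        List.getLast?_eq_getLast_of_ne_nil hs, h0v]
      simp only [Option.getD_some]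
      have hub : ∀ y ∈ s, y ≤ s.getLast hs := pairwise_le_getLast s hpw hs
      have hmin : ∀ y ∈ x :: t, m ≤ y := by
        intro y hy
        have hys : y ∈ s := (hmem y).mpr hy
        rw [hms] at hys
        rcases List.mem_cons.mp hys with rfl | hys
        · exact le_refl _
        · exact (List.pairwise_cons.mp (hms ▸ hpw)).1 y hys
      have hLmem : s.getLast hs ∈ x :: t := (hmem _).mp (List.getLast_mem hs)
      have hmmem : m ∈ x :: t := (hmem m).mp (by rw [hms]; simp)
      have hmL : m ≤ s.getLast hs := hmin _ hLmem
      apply le_antisymm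
      · apply pairMax_le _ _ _ (by omega)
        intro a ha b hb
        have ha1 : a ≤ s.getLast hs := hub a ((hmem a).mpr ha)
        have ha2 : m ≤ a := hmin a ha
        have hb1 : b ≤ s.getLast hs := hub b ((hmem b).mpr hb)
        have hb2 : m ≤ b := hmin b hb
        rw [abs_sub_le_iff]
        constructor <;> omega
      · have hg := pairMax_ge (x :: t) 0 le_rfl (s.getLast hs) hLmem m hmmem
        rwa [abs_of_nonneg (by omega)] at hg
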